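-- pv_equiv track=rewrite | github.com/tgkei/Algorithm_study | by_python/2019_winter_naver_hack/c.py | solution
-- ===== SOURCE A (Python) =====
-- def solution(command, buttons, scores):
--     com_len = len(command)
--     answer = com_len
--     for idx in range(com_len):
--         for score_idx, button in enumerate(buttons):
--             but_len = len(button)
--             if but_len-1 + idx < com_len and command[idx:idx+but_len] == button:
--                 answer = max(answer,idx + scores[score_idx] + solution(command[idx+but_len:],buttons,scores))
--     return answer
-- ===== SOURCE B (Python) =====
-- def solution(command, buttons, scores):
--     # Bottom-up DP over suffix start positions: best[j] (built by prepending)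
--     # holds the answer for the suffix of command starting at position k+1+j.
--     n = len(command)
--     best = [0]
--     for k in range(n - 1, -1, -1):
--         v = 1 + best[0]
--         for i, b in enumerate(buttons):
--             L = len(b)
--             if k + L <= n and command[k:k+L] == b:
--                 v = max(v, scores[i] + best[L - 1])
--         best = [v] + best
--     return best[0]
-- ===== Notes on version B (the rewrite author's own statement) =====
-- stated objective: faster
-- what changed: A recomputes the best score by exponential recursion over every suffix reached by a match; B fills a bottom-up DP array of answers per suffix start position (right to left, one pass). Intended as asymptotically faster; a timing run measured B 2.68x at the largest size both finished (0.53 ms, below its 5 ms measurement floor) and A timed out at n=64 where B returned.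
import Mathlib
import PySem

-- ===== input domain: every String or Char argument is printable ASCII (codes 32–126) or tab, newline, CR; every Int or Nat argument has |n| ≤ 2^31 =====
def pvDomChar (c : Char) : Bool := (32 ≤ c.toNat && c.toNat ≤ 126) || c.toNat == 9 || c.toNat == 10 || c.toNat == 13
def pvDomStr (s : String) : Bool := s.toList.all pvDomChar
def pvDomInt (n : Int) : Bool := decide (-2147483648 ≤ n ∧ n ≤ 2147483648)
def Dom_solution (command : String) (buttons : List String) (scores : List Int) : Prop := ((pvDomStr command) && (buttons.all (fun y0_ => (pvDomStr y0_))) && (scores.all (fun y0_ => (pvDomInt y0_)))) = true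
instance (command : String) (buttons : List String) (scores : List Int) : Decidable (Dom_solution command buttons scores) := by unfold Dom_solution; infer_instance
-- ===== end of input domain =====

-- B replaces A's exponential recursion over command suffixes by a right-to-left DP over
-- suffix start positions (objective: faster — intended asymptotic; a timing run saw A
-- time out at n=64 where B returned, and B 2.68x at the largest size both finished).

-- ===== PORT A =====
-- A's recursion carries no structural decreasing argument, so the port threads a fuel of
-- command.length + 1; inside Pre_solution every recursive call strictly shortens the string
-- (all buttons are nonempty there), so the fuel is never exhausted — a totality guard only.
def goA (buttons : List String) (scores : List Int) : Nat → List Char → Int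
  | 0, _ => 0
  | fuel+1, c =>
    (List.range c.length).foldl (fun (ans : Int) (idx : Nat) =>
      (PySem.List.enumerate buttons 0).foldl (fun ans2 ib =>
        if ((ib.2.toList.length : Int) - 1 + (idx : Int) < (c.length : Int)) ∧
           PySem.List.slice c (some (idx : Int)) (some ((idx : Int) + (ib.2.toList.length : Int))) = ib.2.toList
        then max ans2 ((idx : Int) + PySem.List.pyGetD scores ib.1 0
                        + goA buttons scores fuel (c.drop (idx + ib.2.toList.length)))
        else ans2) ans) ((c.length : Int))

def solution (command : String) (buttons : List String) (scores : List Int) : Int :=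
  goA buttons scores (command.toList.length + 1) command.toList

-- ===== PORT B =====
-- one pass of Source B's inner loop: best holds the answers for the suffixes starting at
-- k+1, …, n (front to back); returns the new best list with the answer for k prepended
def stepB (c : List Char) (buttons : List String) (scores : List Int) (best : List Int) (k : Int) : List Int :=
  (PySem.List.enumerate buttons 0).foldl (fun v ib =>
      if k + (ib.2.toList.length : Int) ≤ (c.length : Int) ∧
         PySem.List.slice c (some k) (some (k + (ib.2.toList.length : Int))) = ib.2.toList
      then max v (PySem.List.pyGetD scores ib.1 0
                   + PySem.List.pyGetD best ((ib.2.toList.length : Int) - 1) 0)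
      else v) (1 + PySem.List.pyGetD best 0 0) :: best

def solution_alt (command : String) (buttons : List String) (scores : List Int) : Int :=
  PySem.List.pyGetD
    ((PySem.List.pyRange ((command.toList.length : Int) - 1) (-1) (-1)).foldl
      (stepB command.toList buttons scores) [0]) 0 0

-- ===== PRECONDITION & SPEC =====
-- Pre_ excludes exactly the inputs on which the Python A raises: with a nonempty command,
-- an empty button makes A recurse on the unchanged command (RecursionError), and a button
-- whose index has no score but which occurs inside the command reaches scores[i] out of
-- range (IndexError).  A returns normally on every other input.
def Pre_solution (command : String) (buttons : List String) (scores : List Int) : Prop :=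
  command.toList = [] ∨
    ((∀ b ∈ buttons, b.toList ≠ []) ∧
     ∀ b ∈ buttons.drop scores.length, ¬ (b.toList <:+: command.toList))
instance (command : String) (buttons : List String) (scores : List Int) : Decidable (Pre_solution command buttons scores) := by unfold Pre_solution; infer_instance

def pvWitness_solution : String × List String × List Int := ("abab", ["ab", "b"], [3, 1])

def Spec_solution (command : String) (buttons : List String) (scores : List Int) (out : Int) : Prop := out = solution_alt command buttons scores
instance (command : String) (buttons : List String) (scores : List Int) (out : Int) : Decidable (Spec_solution command buttons scores out) := by unfold Spec_solution; infer_instance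

-- ===== CLAIM (what is proved, stated in full; the proofs are below) =====
def Claim_equal_solution : Prop := ∀ (command : String) (buttons : List String) (scores : List Int), Dom_solution command buttons scores → Pre_solution command buttons scores → Spec_solution command buttons scores (solution command buttons scores)

-- ===== LEMMAS AND PROOFS =====

-- candidate values contributed by A's inner loop at offset idx of c (r = the recursive call)
def candInner (buttons : List String) (scores : List Int) (r : List Char → Int)
    (c : List Char) (idx : Nat) : List Int :=
  (PySem.List.enumerate buttons 0).filterMap (fun ib =>
     if ((ib.2.toList.length : Int) - 1 + (idx : Int) < (c.length : Int)) ∧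
        PySem.List.slice c (some (idx : Int)) (some ((idx : Int) + (ib.2.toList.length : Int))) = ib.2.toList
     then some ((idx : Int) + PySem.List.pyGetD scores ib.1 0 + r (c.drop (idx + ib.2.toList.length)))
     else none)

def cand (buttons : List String) (scores : List Int) (r : List Char → Int) (c : List Char) : List Int :=
  (List.range c.length).flatMap (candInner buttons scores r c)

-- conditional running max = foldl max over the kept values

-- a conditional running max is a foldl max over the kept values
theorem foldl_max_if {α : Type} (l : List α) (p : α → Prop) [DecidablePred p]
    (v : α → Int) (a : Int) :
    l.foldl (fun acc x => if p x then max acc (v x) else acc) a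
      = List.foldl max a (l.filterMap (fun x => if p x then some (v x) else none)) := by
  induction l generalizing a with
  | nil => rfl
  | cons x t ih => by_cases h : p x <;> simp [h, ih]

-- a fold of running-max folds = one foldl max over the flatMap

-- a fold of running-max folds is one foldl max over the flatMap
theorem foldl_max_flatMap {α : Type} (l : List α) (g : α → List Int) (a : Int) :
    l.foldl (fun acc x => List.foldl max acc (g x)) a
      = List.foldl max a (l.flatMap g) := by
  induction l generalizing a with
  | nil => rfl
  | cons x t ih => simp [ih, List.foldl_append]

theorem foldl_max_max (l : List Int) (a x : Int) :
    List.foldl max (max a x) l = max x (List.foldl max a l) := by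
  induction l generalizing a with
  | nil => simp [max_comm]
  | cons y t ih =>
    have : max (max a x) y = max (max a y) x := by omega
    simp only [List.foldl_cons, this, ih]

theorem foldl_max_swap (l₁ l₂ : List Int) (a : Int) :
    List.foldl max (List.foldl max a l₁) l₂ = List.foldl max (List.foldl max a l₂) l₁ := by
  induction l₁ generalizing a with
  | nil => rfl
  | cons x t ih =>
    calc List.foldl max (List.foldl max a (x::t)) l₂
        = List.foldl max (List.foldl max (max a x) t) l₂ := rfl
      _ = List.foldl max (List.foldl max (max a x) l₂) t := ih (max a x)
      _ = List.foldl max (max x (List.foldl max a l₂)) t := by rw [foldl_max_max]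
      _ = List.foldl max (max (List.foldl max a l₂) x) t := by rw [max_comm]
      _ = List.foldl max (List.foldl max a l₂) (x::t) := rfl

theorem one_add_foldl_max (l : List Int) (a : Int) :
    1 + List.foldl max a l = List.foldl max (1 + a) (l.map (fun z => 1 + z)) := by
  induction l generalizing a with
  | nil => rfl
  | cons x t ih =>
    simp only [List.map_cons, List.foldl_cons]
    rw [ih]
    congr 1
    omega

-- A characterised: the double loop is a foldl max over the candidate list

-- A characterised: the double loop is a foldl max over the candidate list
theorem goA_char (buttons : List String) (scores : List Int) (fuel : Nat) (c : List Char) :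
    goA buttons scores (fuel + 1) c
      = List.foldl max ((c.length : Int)) (cand buttons scores (goA buttons scores fuel) c) := by
  rw [goA]
  have h1 : (fun (ans : Int) (idx : Nat) =>
      (PySem.List.enumerate buttons 0).foldl (fun ans2 ib =>
        if ((ib.2.toList.length : Int) - 1 + (idx : Int) < (c.length : Int)) ∧
           PySem.List.slice c (some (idx : Int)) (some ((idx : Int) + (ib.2.toList.length : Int))) = ib.2.toList
        then max ans2 ((idx : Int) + PySem.List.pyGetD scores ib.1 0
                        + goA buttons scores fuel (c.drop (idx + ib.2.toList.length)))
        else ans2) ans)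
    = fun (ans : Int) (idx : Nat) =>
        List.foldl max ans (candInner buttons scores (goA buttons scores fuel) c idx) := by
    funext ans idx
    exact foldl_max_if _ _ _ _
  rw [h1, foldl_max_flatMap]
  rfl

theorem mem_buttons_of_mem_enumerate {buttons : List String} {ib : Int × String}
    (h : ib ∈ PySem.List.enumerate buttons 0) : ib.2 ∈ buttons := by
  rcases (PySem.List.mem_enumerate_iff _ _ _).mp h with ⟨k, hk, rfl⟩
  simp

-- candidates only look at strictly shorter suffixes (buttons nonempty)
theorem cand_congr (buttons : List String) (scores : List Int)
    (hE : ∀ b ∈ buttons, b.toList ≠ []) (c : List Char) (r r' : List Char → Int)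
    (h : ∀ u : List Char, u.length < c.length → r u = r' u) :
    cand buttons scores r c = cand buttons scores r' c := by
  unfold cand
  apply List.flatMap_congr
  intro idx hidx
  have hidx' : idx < c.length := List.mem_range.mp hidx
  unfold candInner
  apply List.filterMap_congr
  intro ib hib
  by_cases hcond : ((ib.2.toList.length : Int) - 1 + (idx : Int) < (c.length : Int)) ∧
       PySem.List.slice c (some (idx : Int)) (some ((idx : Int) + (ib.2.toList.length : Int))) = ib.2.toList
  · rw [if_pos hcond, if_pos hcond]
    have hL : ib.2.toList.length ≠ 0 := by
      intro h0
      exact hE ib.2 (mem_buttons_of_mem_enumerate hib) (List.eq_nil_of_length_eq_zero h0)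
    have hle : idx + ib.2.toList.length ≤ c.length := by
      have := hcond.1
      omega
    have hdrop : (c.drop (idx + ib.2.toList.length)).length < c.length := by
      simp only [List.length_drop]
      omega
    rw [h _ hdrop]
  · rw [if_neg hcond, if_neg hcond]

-- fuel does not matter once it covers the length (all buttons nonempty)
theorem goA_fuel (buttons : List String) (scores : List Int)
    (hE : ∀ b ∈ buttons, b.toList ≠ []) :
    ∀ N c f1 f2, c.length ≤ N → c.length ≤ f1 → c.length ≤ f2 →
      goA buttons scores (f1 + 1) c = goA buttons scores (f2 + 1) c := by
  intro N
  induction N with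
  | zero =>
    intro c f1 f2 hN _ _
    have hc : c = [] := List.eq_nil_of_length_eq_zero (Nat.le_zero.mp hN)
    subst hc
    simp [goA_char, cand]
  | succ N ih =>
    intro c f1 f2 hN h1 h2
    by_cases hc : c.length = 0
    · have hc' : c = [] := List.eq_nil_of_length_eq_zero hc
      subst hc'
      simp [goA_char, cand]
    · obtain ⟨g1, rfl⟩ : ∃ g1, f1 = g1 + 1 := ⟨f1 - 1, by omega⟩
      obtain ⟨g2, rfl⟩ : ∃ g2, f2 = g2 + 1 := ⟨f2 - 1, by omega⟩
      rw [goA_char, goA_char]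
      congr 1
      apply cand_congr buttons scores hE
      intro u hu
      exact ih u g1 g2 (by omega) (by omega) (by omega)

theorem cand_fuel (buttons : List String) (scores : List Int)
    (hE : ∀ b ∈ buttons, b.toList ≠ []) (c : List Char) (f1 f2 : Nat)
    (h1 : c.length ≤ f1) (h2 : c.length ≤ f2) :
    cand buttons scores (goA buttons scores f1) c = cand buttons scores (goA buttons scores f2) c := by
  apply cand_congr buttons scores hE
  intro u hu
  obtain ⟨g1, rfl⟩ : ∃ g1, f1 = g1 + 1 := ⟨f1 - 1, by omega⟩
  obtain ⟨g2, rfl⟩ : ∃ g2, f2 = g2 + 1 := ⟨f2 - 1, by omega⟩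
  exact goA_fuel buttons scores hE u.length u g1 g2 le_rfl (by omega) (by omega)

-- A's recurrence at the head of a nonempty list, in candidate form

-- shifting A's outer loop index by one step into the tail
theorem candInner_succ (buttons : List String) (scores : List Int) (r : List Char → Int)
    (x : Char) (t : List Char) (idx : Nat) :
    candInner buttons scores r (x :: t) (idx + 1)
      = (candInner buttons scores r t idx).map (fun z => 1 + z) := by
  unfold candInner
  rw [List.map_filterMap]
  apply List.filterMap_congr
  intro ib _
  have hsl1 : PySem.List.slice (x :: t) (some ((idx+1 : Nat) : Int))
      (some (((idx+1 : Nat) : Int) + (ib.2.toList.length : Int))) = (t.drop idx).take ib.2.toList.length := by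
    rw [PySem.List.slice_natCast_add]
    simp
  have hsl2 : PySem.List.slice t (some ((idx : Nat) : Int))
      (some (((idx : Nat) : Int) + (ib.2.toList.length : Int))) = (t.drop idx).take ib.2.toList.length := by
    rw [PySem.List.slice_natCast_add]
  have hcond : (((ib.2.toList.length : Int) - 1 + ((idx+1 : Nat) : Int) < ((x :: t).length : Int)) ∧
        PySem.List.slice (x :: t) (some ((idx+1 : Nat) : Int)) (some (((idx+1 : Nat) : Int) + (ib.2.toList.length : Int))) = ib.2.toList)
      ↔ (((ib.2.toList.length : Int) - 1 + ((idx : Nat) : Int) < ((t).length : Int)) ∧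
        PySem.List.slice t (some ((idx : Nat) : Int)) (some (((idx : Nat) : Int) + (ib.2.toList.length : Int))) = ib.2.toList) := by
    rw [hsl1, hsl2]
    constructor
    · rintro ⟨h1, h2⟩
      refine ⟨?_, h2⟩
      simp only [List.length_cons] at h1
      push_cast at h1 ⊢
      omega
    · rintro ⟨h1, h2⟩
      refine ⟨?_, h2⟩
      simp only [List.length_cons]
      push_cast at h1 ⊢
      omega
  by_cases h : ((ib.2.toList.length : Int) - 1 + ((idx : Nat) : Int) < ((t).length : Int)) ∧
        PySem.List.slice t (some ((idx : Nat) : Int)) (some (((idx : Nat) : Int) + (ib.2.toList.length : Int))) = ib.2.toList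
  · rw [if_pos (hcond.mpr h), if_pos h]
    simp only [Option.map_some, Option.some.injEq]
    have hdrop : (x :: t).drop (idx + 1 + ib.2.toList.length) = t.drop (idx + ib.2.toList.length) := by
      have : idx + 1 + ib.2.toList.length = (idx + ib.2.toList.length) + 1 := by omega
      rw [this, List.drop_succ_cons]
    rw [hdrop]
    push_cast
    ring
  · rw [if_neg (fun hx => h (hcond.mp hx)), if_neg h]
    rfl

-- A's recurrence at the head of a nonempty list, in candidate form
theorem goA_cons (buttons : List String) (scores : List Int)
    (hE : ∀ b ∈ buttons, b.toList ≠ []) (x : Char) (t : List Char) :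
    goA buttons scores (t.length + 2) (x :: t)
      = List.foldl max (1 + goA buttons scores (t.length + 1) t)
          (candInner buttons scores (goA buttons scores (t.length + 1)) (x :: t) 0) := by
  have h1 : goA buttons scores (t.length + 2) (x :: t)
      = List.foldl max (((x :: t).length : Int))
          (cand buttons scores (goA buttons scores (t.length + 1)) (x :: t)) := goA_char _ _ _ _
  have hdec : cand buttons scores (goA buttons scores (t.length + 1)) (x :: t)
      = candInner buttons scores (goA buttons scores (t.length + 1)) (x :: t) 0
        ++ (cand buttons scores (goA buttons scores (t.length + 1)) t).map (fun z => 1 + z) := by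
    unfold cand
    simp only [List.length_cons, List.range_succ_eq_map, List.flatMap_cons, List.flatMap_map]
    congr 1
    rw [List.map_flatMap]
    apply List.flatMap_congr
    intro idx _
    exact candInner_succ buttons scores _ x t idx
  rw [h1, hdec, List.foldl_append, foldl_max_swap]
  have hlen : (((x :: t).length : Int)) = 1 + (t.length : Int) := by
    simp only [List.length_cons]
    push_cast
    ring
  rw [hlen, ← one_add_foldl_max]
  have hfold : goA buttons scores (t.length + 1) t
      = List.foldl max ((t.length : Int)) (cand buttons scores (goA buttons scores (t.length + 1)) t) := by
    rw [goA_char]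
    congr 1
    exact cand_fuel buttons scores hE t t.length (t.length + 1) le_rfl (by omega)
  rw [← hfold]

-- value of A on the suffix of c starting at k, with just enough fuel
def fA (buttons : List String) (scores : List Int) (c : List Char) (k : Nat) : Int :=
  goA buttons scores (c.length - k + 1) (c.drop k)

-- one iteration of B's loop prepends exactly A's value for the suffix at j
theorem step_eq (buttons : List String) (scores : List Int)
    (hE : ∀ b ∈ buttons, b.toList ≠ []) (c : List Char) (j : Nat) (hj : j < c.length) :
    stepB c buttons scores
        ((List.range (c.length - (j+1) + 1)).map (fun m => fA buttons scores c (j+1+m))) (j : Int)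
      = (List.range (c.length - j + 1)).map (fun m => fA buttons scores c (j+m)) := by
  obtain ⟨cj, hxt⟩ : ∃ y, c.drop j = y :: c.drop (j+1) := ⟨_, List.drop_eq_getElem_cons hj⟩
  have htlen : (c.drop (j+1)).length = c.length - (j+1) := by simp
  have hdlen : (c.drop j).length = c.length - j := by simp
  -- RHS peels its head
  have hr : (List.range (c.length - j + 1)).map (fun m => fA buttons scores c (j+m))
      = fA buttons scores c j
        :: (List.range (c.length - (j+1) + 1)).map (fun m => fA buttons scores c (j+1+m)) := by
    have he : c.length - j + 1 = (c.length - (j+1) + 1) + 1 := by omega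
    rw [he, List.range_succ_eq_map, List.map_cons, List.map_map]
    congr 1
    apply List.map_congr_left
    intro m _
    show fA buttons scores c (j + Nat.succ m) = fA buttons scores c (j+1+m)
    congr 1
    omega
  rw [hr]
  unfold stepB
  congr 1
  -- the fold over the buttons equals fA c j
  set best := (List.range (c.length - (j+1) + 1)).map (fun m => fA buttons scores c (j+1+m)) with hbestdef
  have hblen : best.length = c.length - (j+1) + 1 := by simp [hbestdef]
  have hinit : PySem.List.pyGetD best 0 0 = fA buttons scores c (j+1) := by
    rw [hbestdef, List.range_succ_eq_map, List.map_cons]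
    simp [PySem.List.pyGetD_zero]
  have hgd : ∀ L : Nat, 1 ≤ L → j + L ≤ c.length →
      PySem.List.pyGetD best ((L : Int) - 1) 0 = fA buttons scores c (j+L) := by
    intro L h1 h2
    rw [show ((L : Int) - 1) = ((L - 1 : Nat) : Int) by omega, PySem.List.pyGetD_natCast]
    have hlt : L - 1 < c.length - (j+1) + 1 := by omega
    rw [hbestdef]
    simp only [List.getD_eq_getElem?_getD, List.getElem?_map, List.getElem?_range, hlt]
    simp only [Option.map_some, Option.getD_some]
    congr 1
    omega
  rw [foldl_max_if (p := fun ib : Int × String =>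
        ((j : Int) + (ib.2.toList.length : Int) ≤ (c.length : Int) ∧
         PySem.List.slice c (some (j : Int)) (some ((j : Int) + (ib.2.toList.length : Int))) = ib.2.toList))
      (v := fun ib : Int × String =>
        PySem.List.pyGetD scores ib.1 0 + PySem.List.pyGetD best ((ib.2.toList.length : Int) - 1) 0)]
  have hcI : (PySem.List.enumerate buttons 0).filterMap (fun ib =>
        if ((j : Int) + (ib.2.toList.length : Int) ≤ (c.length : Int) ∧
            PySem.List.slice c (some (j : Int)) (some ((j : Int) + (ib.2.toList.length : Int))) = ib.2.toList)
        then some (PySem.List.pyGetD scores ib.1 0 + PySem.List.pyGetD best ((ib.2.toList.length : Int) - 1) 0)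
        else none)
      = candInner buttons scores (goA buttons scores ((c.drop (j+1)).length + 1)) (cj :: c.drop (j+1)) 0 := by
    unfold candInner
    apply List.filterMap_congr
    intro ib hib
    have hL : 1 ≤ ib.2.toList.length := by
      have := hE ib.2 (mem_buttons_of_mem_enumerate hib)
      cases h : ib.2.toList with
      | nil => exact absurd h this
      | cons y ys => simp
    have hsl1 : PySem.List.slice c (some (j : Int)) (some ((j : Int) + (ib.2.toList.length : Int)))
        = (c.drop j).take ib.2.toList.length := PySem.List.slice_natCast_add c j ib.2.toList.length
    have hsl2 : PySem.List.slice (cj :: c.drop (j+1)) (some ((0 : Nat) : Int))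
        (some (((0 : Nat) : Int) + (ib.2.toList.length : Int)))
        = (c.drop j).take ib.2.toList.length := by
      rw [PySem.List.slice_natCast_add, ← hxt]
      simp
    have hclen : ((cj :: c.drop (j+1)).length : Int) = ((c.length : Int) - (j : Int)) := by
      rw [← hxt]
      simp only [List.length_drop]
      omega
    have hcond : (((ib.2.toList.length : Int) - 1 + ((0 : Nat) : Int) < ((cj :: c.drop (j+1)).length : Int)) ∧
          PySem.List.slice (cj :: c.drop (j+1)) (some ((0 : Nat) : Int))
            (some (((0 : Nat) : Int) + (ib.2.toList.length : Int))) = ib.2.toList)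
        ↔ (((j : Int) + (ib.2.toList.length : Int) ≤ (c.length : Int)) ∧
           PySem.List.slice c (some (j : Int)) (some ((j : Int) + (ib.2.toList.length : Int))) = ib.2.toList) := by
      rw [hsl1, hsl2, hclen]
      constructor
      · rintro ⟨h1, h2⟩
        exact ⟨by push_cast at h1 ⊢; omega, h2⟩
      · rintro ⟨h1, h2⟩
        exact ⟨by push_cast at h1 ⊢; omega, h2⟩
    by_cases h : ((j : Int) + (ib.2.toList.length : Int) ≤ (c.length : Int)) ∧
        PySem.List.slice c (some (j : Int)) (some ((j : Int) + (ib.2.toList.length : Int))) = ib.2.toList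
    · rw [if_pos h, if_pos (hcond.mpr h)]
      have hjL : j + ib.2.toList.length ≤ c.length := by
        have := h.1
        omega
      rw [hgd ib.2.toList.length hL hjL]
      have hdrop2 : (cj :: c.drop (j+1)).drop (0 + ib.2.toList.length) = c.drop (j + ib.2.toList.length) := by
        rw [← hxt, Nat.zero_add, List.drop_drop]
      rw [hdrop2]
      have hfa : fA buttons scores c (j + ib.2.toList.length)
          = goA buttons scores ((c.drop (j+1)).length + 1) (c.drop (j + ib.2.toList.length)) := by
        unfold fA
        have hulen : (c.drop (j + ib.2.toList.length)).length = c.length - (j + ib.2.toList.length) := by simp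
        obtain ⟨g2, hg2⟩ : ∃ g2, c.length - (j + ib.2.toList.length) + 1 = g2 + 1 :=
          ⟨c.length - (j + ib.2.toList.length), rfl⟩
        rw [hg2, show (c.drop (j+1)).length + 1 = (c.length - (j+1)) + 1 by rw [htlen]]
        exact goA_fuel buttons scores hE (c.drop (j + ib.2.toList.length)).length _ _ _
          le_rfl (by omega) (by omega)
      rw [hfa]
      simp
    · rw [if_neg h, if_neg (fun hx => h (hcond.mp hx))]
  rw [hcI, hinit]
  -- now the left side is exactly A's recurrence at the head of c.drop j
  have hfj : fA buttons scores c j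
      = goA buttons scores ((c.drop (j+1)).length + 2) (cj :: c.drop (j+1)) := by
    unfold fA
    rw [hxt]
    congr 1
    omega
  have hfj1 : goA buttons scores ((c.drop (j+1)).length + 1) (c.drop (j+1))
      = fA buttons scores c (j+1) := by
    unfold fA
    congr 1
    omega
  rw [hfj, goA_cons buttons scores hE, hfj1]

theorem pyRange_snoc (a b : Int) (h : b < a) :
    PySem.List.pyRange a b (-1) = PySem.List.pyRange a (b+1) (-1) ++ [b+1] := by
  rw [PySem.List.pyRange_neg_one_eq_reverse, PySem.List.pyRange_neg_one_eq_reverse,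
      PySem.List.pyRange_one_cons (by omega : b + 1 < a + 1)]
  rw [List.reverse_cons]

theorem goA_nil (buttons : List String) (scores : List Int) (fuel : Nat) :
    goA buttons scores (fuel + 1) [] = 0 := by
  rw [goA_char]
  simp [cand]

-- B's loop invariant: after processing down to j, best = [fA j, ..., fA n]
theorem inv_loop (buttons : List String) (scores : List Int)
    (hE : ∀ b ∈ buttons, b.toList ≠ []) (c : List Char) :
    ∀ d j, j + d = c.length →
      (PySem.List.pyRange ((c.length : Int) - 1) ((j : Int) - 1) (-1)).foldl
          (stepB c buttons scores) [0]
        = (List.range (c.length - j + 1)).map (fun m => fA buttons scores c (j+m)) := by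
  intro d
  induction d with
  | zero =>
    intro j hj
    have hj' : j = c.length := by omega
    subst hj'
    rw [PySem.List.pyRange_neg_one_eq_nil (by omega)]
    simp only [List.foldl_nil]
    rw [show c.length - c.length + 1 = 1 by omega]
    simp only [List.range_one, List.map_cons, List.map_nil]
    unfold fA
    rw [show c.length + 0 = c.length by omega, List.drop_length,
        show c.length - c.length + 1 = 0 + 1 by omega, goA_nil]
  | succ d ih =>
    intro j hj
    have hjlt : j < c.length := by omega
    have hsplit : PySem.List.pyRange ((c.length : Int) - 1) ((j : Int) - 1) (-1)
        = PySem.List.pyRange ((c.length : Int) - 1) (((j+1 : Nat) : Int) - 1) (-1) ++ [(j : Int)] := by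
      rw [pyRange_snoc _ _ (by omega)]
      congr 2 <;> push_cast <;> omega
    rw [hsplit, List.foldl_append, ih (j+1) (by omega), List.foldl_cons, List.foldl_nil,
        step_eq buttons scores hE c j hjlt]

-- ===== VERDICT (by name: the statement is the Claim_ definition above) =====
theorem solution_spec : Claim_equal_solution := by
  unfold Claim_equal_solution
  intro command buttons scores _ hpre
  unfold Spec_solution solution solution_alt
  rcases hpre with hnil | ⟨hE, -⟩
  · rw [hnil]
    simp only [List.length_nil, Nat.cast_zero, zero_sub]
    rw [PySem.List.pyRange_neg_one_eq_nil (by omega), goA_nil]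
    simp [PySem.List.pyGetD_zero]
  · have h := inv_loop buttons scores hE command.toList command.toList.length 0 (by omega)
    simp only [Nat.cast_zero, zero_sub, Nat.sub_zero, Nat.zero_add] at h
    rw [h]
    rw [List.range_succ_eq_map, List.map_cons]
    simp only [PySem.List.pyGetD_zero, List.getD_cons_zero]
    unfold fA
    simp
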